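-- pv_equiv track=rewrite | github.com/sanjana-d/csc384-Intro-To-AI | Labs/A3-starter-files-dasadias/cspmodel.py | satisfying_tuples_black_dots
-- ===== SOURCE A (Python) =====
-- def satisfying_tuples_black_dots(dim):
--     """
--     Return a list of satifying tuples for black dot constraints.
--
--     :param dim: Size of the board
--     :type dim: int
--
--     :returns: A list of satifying tuples
--     :rtype: List[(int,int)]
--     """
--
--     tups = []
--     for i in range(1, dim+1):
--         for j in range(1, dim+1):
--             if i != j:
--                 if 2*i == j or 2*j == i:
--                     tups.append((i, j))
--     return tups
-- ===== SOURCE B (Python) =====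
-- def satisfying_tuples_black_dots(dim):
--     """
--     Return a list of satifying tuples for black dot constraints.
--
--     One O(dim) pass: for each i emit (i, i//2) when i is even, then (i, 2*i)
--     when 2*i fits on the board; this is exactly the order A's nested scan finds them.
--     """
--     tups = []
--     for i in range(1, dim + 1):
--         if i % 2 == 0:
--             tups.append((i, i // 2))
--         if 2 * i <= dim:
--             tups.append((i, 2 * i))
--     return tups
-- ===== Notes on version B (the rewrite author's own statement) =====
-- stated objective: faster
-- what changed: Replaced the O(dim^2) nested scan over all (i,j) pairs by a single O(dim) pass that directly emits (i,i//2) for even i and (i,2i) when 2i<=dim, in the same order.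
import Mathlib
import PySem

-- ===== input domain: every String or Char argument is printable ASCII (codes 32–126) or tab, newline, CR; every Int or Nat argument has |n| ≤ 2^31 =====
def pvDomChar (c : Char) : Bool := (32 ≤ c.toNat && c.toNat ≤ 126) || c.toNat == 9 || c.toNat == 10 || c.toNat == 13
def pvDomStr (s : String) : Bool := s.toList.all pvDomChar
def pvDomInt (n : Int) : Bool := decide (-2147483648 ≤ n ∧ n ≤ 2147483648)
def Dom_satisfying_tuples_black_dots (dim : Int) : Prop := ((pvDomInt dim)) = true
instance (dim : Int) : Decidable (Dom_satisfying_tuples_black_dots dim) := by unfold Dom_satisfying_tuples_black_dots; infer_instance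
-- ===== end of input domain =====

-- B replaces A's O(dim^2) nested scan by one O(dim) pass emitting (i,i//2) and (i,2i) directly.

-- ===== PORT A =====
def satisfying_tuples_black_dots (dim : Int) : List (Int × Int) :=
  (PySem.List.pyRange 1 (dim+1) 1).foldl (fun tups i =>
    (PySem.List.pyRange 1 (dim+1) 1).foldl (fun tups j =>
      if ¬ i = j then
        if 2*i = j ∨ 2*j = i then tups ++ [(i, j)] else tups
      else tups) tups) []

-- ===== PORT B =====
def satisfying_tuples_black_dots_alt (dim : Int) : List (Int × Int) :=
  (PySem.List.pyRange 1 (dim+1) 1).foldl (fun tups i =>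
    let tups' := if PySem.Int.mod i 2 = 0 then tups ++ [(i, PySem.Int.floordiv i 2)] else tups
    if 2*i ≤ dim then tups' ++ [(i, 2*i)] else tups') []

-- ===== PRECONDITION & SPEC =====
def Spec_satisfying_tuples_black_dots (dim : Int) (out : List (Int × Int)) : Prop := out = satisfying_tuples_black_dots_alt dim
instance (dim : Int) (out : List (Int × Int)) : Decidable (Spec_satisfying_tuples_black_dots dim out) := by unfold Spec_satisfying_tuples_black_dots; infer_instance

-- ===== CLAIM (what is proved, stated in full; the proofs are below) =====
def Claim_equal_satisfying_tuples_black_dots : Prop := ∀ (dim : Int), Dom_satisfying_tuples_black_dots dim → Spec_satisfying_tuples_black_dots dim (satisfying_tuples_black_dots dim)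

-- ===== LEMMAS AND PROOFS =====

-- the per-i segment both programs append, in B's (= A's) order
def pvSeg (dim i : Int) : List (Int × Int) :=
  (if i % 2 = 0 then [(i, i / 2)] else []) ++ (if 2*i ≤ dim then [(i, 2*i)] else [])

theorem alt_eq_foldl_seg (dim : Int) :
    satisfying_tuples_black_dots_alt dim
      = (PySem.List.pyRange 1 (dim+1) 1).foldl (fun acc i => acc ++ pvSeg dim i) [] := by
  unfold satisfying_tuples_black_dots_alt
  apply PySem.List.foldl_congr_mem
  intro acc i hi
  have hmem := (PySem.List.mem_pyRange_one).1 hi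
  have h2 : (0:Int) < 2 := by norm_num
  simp only [PySem.Int.mod_eq_emod_of_pos h2, PySem.Int.floordiv_eq_ediv_of_pos h2, pvSeg]
  split_ifs <;> simp

theorem filter_range_eq (i : Int) (hi : 1 ≤ i) (n : ℕ) :
    (PySem.List.pyRange 1 ((n:Int)+1) 1).filter
        (fun j => decide (¬ i = j ∧ (2*i = j ∨ 2*j = i)))
      = (if i % 2 = 0 ∧ i ≤ 2*(n:Int) then [i / 2] else [])
        ++ (if 2*i ≤ (n:Int) then [2*i] else []) := by
  induction n with
  | zero =>
      rw [PySem.List.pyRange_one_eq_nil (by norm_num)]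
      rw [if_neg (by omega), if_neg (by omega)]
      rfl
  | succ n ih =>
      have hsp : (( (n+1:ℕ) :Int)+1) = ((n:Int)+1)+1 := by push_cast; ring
      rw [hsp, PySem.List.pyRange_one_succ_right (by omega), List.filter_append, ih]
      simp only [List.filter_cons, List.filter_nil, decide_eq_true_eq]
      push_cast
      split_ifs <;> simp_all <;> omega

theorem a_eq_foldl_seg (dim : Int) :
    satisfying_tuples_black_dots dim
      = (PySem.List.pyRange 1 (dim+1) 1).foldl (fun acc i => acc ++ pvSeg dim i) [] := by
  unfold satisfying_tuples_black_dots
  apply PySem.List.foldl_congr_mem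
  intro acc i hi
  have hmem := (PySem.List.mem_pyRange_one).1 hi
  have hi1 : 1 ≤ i := hmem.1
  have hid : i ≤ dim := by omega
  have hd0 : 0 ≤ dim := by omega
  have hn : ((dim.toNat : Int)) = dim := Int.toNat_of_nonneg hd0
  -- merge the two nested ifs into one boolean test
  have hbody :
      (PySem.List.pyRange 1 (dim+1) 1).foldl (fun tups j =>
          if ¬ i = j then
            if 2*i = j ∨ 2*j = i then tups ++ [(i, j)] else tups
          else tups) acc
        = (PySem.List.pyRange 1 (dim+1) 1).foldl (fun tups j =>
          if (decide (¬ i = j ∧ (2*i = j ∨ 2*j = i)) : Bool) = true then tups ++ [(i, j)]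
          else tups) acc := by
    apply PySem.List.foldl_congr_mem
    intro acc' j _
    by_cases h1 : i = j <;> by_cases h2 : 2*i = j ∨ 2*j = i <;> simp [h1, h2]
  rw [hbody]
  have := PySem.List.foldl_append_if
    (l := PySem.List.pyRange 1 (dim+1) 1)
    (p := fun j => decide (¬ i = j ∧ (2*i = j ∨ 2*j = i)))
    (f := fun j => ((i, j) : Int × Int)) (acc := acc)
  simp only [decide_eq_true_eq] at this ⊢
  rw [this]
  have hfilter := filter_range_eq i hi1 dim.toNat
  rw [hn] at hfilter
  rw [hfilter]
  have hle2 : i ≤ 2*dim := by omega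
  congr 1
  simp only [pvSeg, List.map_append, apply_ite (List.map (fun j => ((i, j) : Int × Int)))]
  rw [if_congr (show (i % 2 = 0 ∧ i ≤ 2*dim) ↔ i % 2 = 0 from by constructor <;> intro h <;> [exact h.1; exact ⟨h, hle2⟩]) rfl rfl]
  simp

-- ===== VERDICT (by name: the statement is the Claim_ definition above) =====
theorem satisfying_tuples_black_dots_spec : Claim_equal_satisfying_tuples_black_dots := by
  intro dim _
  unfold Spec_satisfying_tuples_black_dots
  rw [a_eq_foldl_seg, alt_eq_foldl_seg]
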